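-- pv_equiv track=rewrite | github.com/mischaikow/advent_of_code | 2023/09_code_try2.py | dive
-- ===== SOURCE A (Python) =====
-- def dive(the_list):
--   deeper = 0
--   new_list = []
--   for i in range(len(the_list)-1):
--     value = the_list[i+1] - the_list[i]
--     new_list.append(value)
--     deeper += value
--
--   if deeper == 0:
--     return the_list[0]
--   else:
--     return dive(new_list) + the_list[-1]
-- ===== SOURCE B (Python) =====
-- def dive(the_list):
--     total = 0
--     cur = the_list
--     while True:
--         new = [b - a for a, b in zip(cur, cur[1:])]
--         if sum(new) == 0:
--             return total + cur[0]
--         total += cur[-1]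
--         cur = new
-- ===== Notes on version B (the rewrite author's own statement) =====
-- stated objective: alternative
-- what changed: Replaces the recursion with an iterative while-loop carrying a running total, building each difference layer with zip/list-comprehension and sum instead of an index loop with two accumulators.
import Mathlib
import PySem

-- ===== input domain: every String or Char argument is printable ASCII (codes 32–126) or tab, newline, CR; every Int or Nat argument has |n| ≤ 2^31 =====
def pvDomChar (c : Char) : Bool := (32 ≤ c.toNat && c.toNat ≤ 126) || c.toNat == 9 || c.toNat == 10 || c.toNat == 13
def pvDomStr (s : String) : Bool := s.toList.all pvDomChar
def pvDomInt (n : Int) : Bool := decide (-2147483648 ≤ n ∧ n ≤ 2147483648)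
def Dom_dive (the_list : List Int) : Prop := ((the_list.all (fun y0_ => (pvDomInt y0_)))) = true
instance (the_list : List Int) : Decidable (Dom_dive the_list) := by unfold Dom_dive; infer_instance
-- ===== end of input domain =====

-- B rewrites the recursion as an iterative loop with a running total; building each
-- difference layer by zip/comprehension instead of an index loop with two accumulators.
-- Both A and B raise IndexError on the empty list (excluded by Pre_dive).

-- ===== PORT A =====
-- A's for-loop over range(len-1) building new_list and deeper, as a foldl.
-- Indices i and i+1 are always in range inside the loop, so pyGetD with default 0 is exact.
def diveDiffFold (l : List Int) : List Int × Int :=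
  (PySem.List.pyRange 0 ((l.length : Int) - 1) 1).foldl
    (fun (st : List Int × Int) i =>
      let value := PySem.List.pyGetD l (i + 1) 0 - PySem.List.pyGetD l i 0
      (st.1 ++ [value], st.2 + value)) ([], 0)

-- characterisation of the fold, needed for dive's termination
theorem diveFoldPair (f : Int → Int) (xs : List Int) (acc : List Int) (s : Int) :
    xs.foldl (fun (st : List Int × Int) i => (st.1 ++ [f i], st.2 + f i)) (acc, s)
      = (acc ++ xs.map f, s + (xs.map f).sum) := by
  induction xs generalizing acc s with
  | nil => simp
  | cons x xs ih => simp [ih, add_assoc]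

theorem diveDiffFold_eq (l : List Int) :
    diveDiffFold l = (List.zipWith (fun a b => b - a) l l.tail,
      (List.zipWith (fun a b => b - a) l l.tail).sum) := by
  unfold diveDiffFold
  rw [show (fun (st : List Int × Int) i =>
        let value := PySem.List.pyGetD l (i + 1) 0 - PySem.List.pyGetD l i 0
        (st.1 ++ [value], st.2 + value))
      = (fun (st : List Int × Int) i =>
        (st.1 ++ [PySem.List.pyGetD l (i + 1) 0 - PySem.List.pyGetD l i 0],
         st.2 + (PySem.List.pyGetD l (i + 1) 0 - PySem.List.pyGetD l i 0))) from rfl,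
      diveFoldPair]
  have hmap : (PySem.List.pyRange 0 ((l.length : Int) - 1) 1).map
      (fun i => PySem.List.pyGetD l (i + 1) 0 - PySem.List.pyGetD l i 0)
      = List.zipWith (fun a b => b - a) l l.tail := by
    rw [PySem.List.pyRange_one, List.map_map]
    apply List.ext_getElem
    · simp <;> omega
    · intro k hk1 hk2
      simp only [List.getElem_map, List.getElem_range, Function.comp_apply,
        List.getElem_zipWith, List.getElem_tail]
      have hlen : k + 1 < l.length := by
        simp only [List.length_map, List.length_range] at hk1
        omega
      have h1 : (0 : Int) + (k : Int) + 1 = ((k + 1 : Nat) : Int) := by push_cast; ring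
      have h2 : (0 : Int) + (k : Int) = ((k : Nat) : Int) := by push_cast; ring
      rw [h1, h2, PySem.List.pyGetD_natCast, PySem.List.pyGetD_natCast,
        List.getD_eq_getElem l 0 hlen, List.getD_eq_getElem l 0 (by omega)]
  rw [hmap]; simp

def dive (the_list : List Int) : Int :=
  let st := diveDiffFold the_list
  if h : st.2 = 0 then PySem.List.pyGetD the_list 0 0
  else dive st.1 + PySem.List.pyGetD the_list (-1) 0
termination_by the_list.length
decreasing_by
  have h' : ¬ (diveDiffFold the_list).2 = 0 := h
  rw [diveDiffFold_eq] at h'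
  show (diveDiffFold the_list).1.length < the_list.length
  rw [diveDiffFold_eq]
  simp only [List.length_zipWith, List.length_tail]
  rcases the_list with _ | ⟨x, xs⟩
  · simp at h'
  · simp <;> omega

-- ===== PORT B =====
-- Source B's while-True loop: total accumulator, new layer via zip comprehension.
def diveAltLoop (total : Int) (cur : List Int) : Int :=
  let new := List.zipWith (fun a b => b - a) cur cur.tail  -- zip(cur, cur[1:])
  if h : new.sum = 0 then total + PySem.List.pyGetD cur 0 0
  else diveAltLoop (total + PySem.List.pyGetD cur (-1) 0) new
termination_by cur.length
decreasing_by
  have h' : ¬ (List.zipWith (fun a b => b - a) cur cur.tail).sum = 0 := h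
  show (List.zipWith (fun a b => b - a) cur cur.tail).length < cur.length
  simp only [List.length_zipWith, List.length_tail]
  rcases cur with _ | ⟨x, xs⟩
  · simp at h'
  · simp <;> omega

def dive_alt (the_list : List Int) : Int := diveAltLoop 0 the_list

-- ===== PRECONDITION & SPEC =====
-- Pre_ excludes only the empty list, on which A (and B) raise IndexError.
def Pre_dive (the_list : List Int) : Prop := the_list ≠ []
instance (the_list : List Int) : Decidable (Pre_dive the_list) := by unfold Pre_dive; infer_instance
def pvWitness_dive : List Int := ([1, 3, 6, 10])
def Spec_dive (the_list : List Int) (out : Int) : Prop := out = dive_alt the_list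
instance (the_list : List Int) (out : Int) : Decidable (Spec_dive the_list out) := by unfold Spec_dive; infer_instance

-- ===== CLAIM (what is proved, stated in full; the proofs are below) =====
def Claim_equal_dive : Prop := ∀ (the_list : List Int), Dom_dive the_list → Pre_dive the_list → Spec_dive the_list (dive the_list)

-- ===== LEMMAS AND PROOFS =====
theorem diveAltLoop_eq_add (n : Nat) : ∀ (cur : List Int), cur.length = n →
    ∀ (total : Int), diveAltLoop total cur = total + dive cur := by
  induction n using Nat.strong_induction_on with
  | _ n ih =>
    intro cur hn total
    rw [diveAltLoop.eq_def, dive.eq_def, diveDiffFold_eq]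
    by_cases h : (List.zipWith (fun a b => b - a) cur cur.tail).sum = 0
    · simp [h]
    · simp only [h, dite_false]
      rw [ih (List.zipWith (fun a b => b - a) cur cur.tail).length
        (by subst hn
            simp only [List.length_zipWith, List.length_tail]
            rcases cur with _ | ⟨x, xs⟩
            · simp at h
            · simp <;> omega) _ rfl]
      ring

-- ===== VERDICT (by name: the statement is the Claim_ definition above) =====
theorem dive_spec : Claim_equal_dive := by
  intro l _ _
  unfold Spec_dive dive_alt
  rw [diveAltLoop_eq_add l.length l rfl 0, zero_add]
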